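-- pv_equiv track=rewrite | github.com/EunJung803/Algorithm | Programmers/lv1_부족한금액계산하기.py | solution
-- ===== SOURCE A (Python) =====
-- def solution(price, money, count):
--     answer = -1
--
--     sum = 0
--     for i in range(1, count + 1):
--         sum += price * i
--
--     if (money >= sum):
--         answer = 0
--     else:
--         answer = abs(money - sum)
--
--     return answer
-- ===== SOURCE B (Python) =====
-- def solution(price, money, count):
--     n = count if count > 0 else 0
--     total = price * n * (n + 1) // 2
--     return max(total - money, 0)
-- ===== Notes on version B (the rewrite author's own statement) =====
-- stated objective: faster
-- what changed: Replaces the O(count) loop summing price*i with the arithmetic-series closed form price*n*(n+1)//2 and a max() instead of the if/abs branch.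
import Mathlib
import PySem

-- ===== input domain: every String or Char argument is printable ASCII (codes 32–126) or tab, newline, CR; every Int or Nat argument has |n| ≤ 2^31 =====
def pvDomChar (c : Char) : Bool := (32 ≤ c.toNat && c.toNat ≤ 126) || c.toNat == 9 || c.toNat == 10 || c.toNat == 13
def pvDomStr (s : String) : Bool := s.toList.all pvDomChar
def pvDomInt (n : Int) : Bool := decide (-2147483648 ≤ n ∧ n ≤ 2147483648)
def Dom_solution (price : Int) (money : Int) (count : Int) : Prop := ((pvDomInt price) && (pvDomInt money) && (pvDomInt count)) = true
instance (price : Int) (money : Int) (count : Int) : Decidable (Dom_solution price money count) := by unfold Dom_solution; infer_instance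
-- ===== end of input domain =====

-- B replaces A's O(count) summation loop with the closed form price*n*(n+1)//2 (faster, O(1)).

-- ===== PORT A =====
def solution (price : Int) (money : Int) (count : Int) : Int :=
  let sum := (PySem.List.pyRange 1 (count + 1) 1).foldl (fun s i => s + price * i) 0
  let answer := if money ≥ sum then (0 : Int) else |money - sum|
  answer

-- ===== PORT B =====
def solution_alt (price : Int) (money : Int) (count : Int) : Int :=
  let n := if count > 0 then count else 0
  let total := PySem.Int.floordiv (price * n * (n + 1)) 2
  max (total - money) 0

-- ===== PRECONDITION & SPEC =====
def Spec_solution (price : Int) (money : Int) (count : Int) (out : Int) : Prop := out = solution_alt price money count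
instance (price : Int) (money : Int) (count : Int) (out : Int) : Decidable (Spec_solution price money count out) := by unfold Spec_solution; infer_instance

-- ===== CLAIM (what is proved, stated in full; the proofs are below) =====
def Claim_equal_solution : Prop := ∀ (price : Int) (money : Int) (count : Int), Dom_solution price money count → Spec_solution price money count (solution price money count)

-- ===== LEMMAS AND PROOFS =====

-- Twice A's loop-sum equals price*n*(n+1) (arithmetic series), over natural n.
lemma pvSumA (price : Int) : ∀ n : ℕ,
    2 * ((PySem.List.pyRange 1 ((n : Int) + 1) 1).foldl (fun s i => s + price * i) 0)
      = price * n * (n + 1) := by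
  intro n
  induction n with
  | zero => simp [PySem.List.pyRange_one_eq_nil]
  | succ k ih =>
      have h : PySem.List.pyRange 1 ((k : Int) + 1 + 1) 1
          = PySem.List.pyRange 1 ((k : Int) + 1) 1 ++ [(k : Int) + 1] :=
        PySem.List.pyRange_one_succ_right (by omega)
      push_cast
      push_cast at ih
      rw [h, List.foldl_append]
      simp only [List.foldl_cons, List.foldl_nil]
      linarith [ih]

-- ===== VERDICT (by name: the statement is the Claim_ definition above) =====
theorem solution_spec : Claim_equal_solution := by
  intro price money count _
  unfold Spec_solution solution solution_alt
  by_cases hc : count > 0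
  · have hn : ((count.toNat : Int)) = count := Int.toNat_of_nonneg (by omega)
    have hs := pvSumA price count.toNat
    rw [hn] at hs
    simp only [hc, if_pos]
    set S := (PySem.List.pyRange 1 (count + 1) 1).foldl (fun s i => s + price * i) 0 with hS
    have htot : PySem.Int.floordiv (price * count * (count + 1)) 2 = S := by
      rw [← hs, PySem.Int.floordiv_eq_ediv_of_pos (by omega)]
      exact Int.mul_ediv_cancel_left _ (by omega)
    rw [htot]
    by_cases hm : money ≥ S
    · simp [hm]
    · simp [hm]
      rw [abs_of_neg (by omega)]
      omega
  · have hnil : PySem.List.pyRange 1 (count + 1) 1 = [] :=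
      PySem.List.pyRange_one_eq_nil (by omega)
    rw [hnil]
    simp only [List.foldl_nil, if_neg hc]
    by_cases hm : money ≥ (0 : Int)
    · simp [hm, PySem.Int.floordiv]
    · simp [hm, PySem.Int.floordiv]
      rw [abs_of_neg (by omega)]
      omega
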